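-- pv_equiv track=rewrite | github.com/basakulcay/Python_Fundamentals | x_file.py | x_length_words
-- ===== SOURCE A (Python) =====
-- def x_length_words(sentence,x):
--   word=sentence.split(" ")
--   lengths=[]
--   for w in word:
--     length=len(w)
--     lengths.append(length)
--
--   counter=0
--   for i in lengths:
--     if i>=x:
--       counter+=1
--   if counter==len(word):
--     return True
--   else:
--     return False
-- ===== SOURCE B (Python) =====
-- def x_length_words(sentence, x):
--     # single reduction: the sentence passes iff the shortest word is long enough
--     return min(len(w) for w in sentence.split(" ")) >= x
-- ===== Notes on version B (the rewrite author's own statement) =====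
-- stated objective: simpler
-- what changed: Replaces the build-a-lengths-list pass plus a counting pass compared against the word count with a single reduction that keeps the running minimum word length and compares it to x once.
import Mathlib
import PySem

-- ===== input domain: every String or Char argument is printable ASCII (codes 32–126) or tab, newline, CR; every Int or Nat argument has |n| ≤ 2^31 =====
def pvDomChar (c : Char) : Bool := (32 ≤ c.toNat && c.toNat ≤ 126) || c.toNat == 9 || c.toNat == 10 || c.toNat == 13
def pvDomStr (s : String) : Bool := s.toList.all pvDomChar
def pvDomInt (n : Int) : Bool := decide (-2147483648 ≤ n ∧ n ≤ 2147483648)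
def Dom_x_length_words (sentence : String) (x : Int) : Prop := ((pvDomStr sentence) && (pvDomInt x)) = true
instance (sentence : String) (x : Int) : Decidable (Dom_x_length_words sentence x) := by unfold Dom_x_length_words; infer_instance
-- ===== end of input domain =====

-- B replaces A's two passes (build the list of lengths, count the long ones, compare the
-- counter with the word count) by one reduction keeping the running minimum word length.

-- ===== PORT A =====
def x_length_words (sentence : String) (x : Int) : Bool :=
  let word := (PySem.Str.split? sentence " ").getD []   -- sep ≠ "", so split? is always some
  let lengths := word.foldl (fun acc w => acc ++ [PySem.Str.len w]) []
  let counter := lengths.foldl (fun c i => if i ≥ x then c + 1 else c) (0 : Int)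
  if counter == PySem.List.len word then true else false

-- ===== PORT B =====
def x_length_words_alt (sentence : String) (x : Int) : Bool :=
  match (PySem.Str.split? sentence " ").getD [] with
  | [] => true   -- unreachable: split(" ") always yields at least one element
  | w :: ws => decide (ws.foldl (fun m v => min m (PySem.Str.len v)) (PySem.Str.len w) ≥ x)

-- ===== PRECONDITION & SPEC =====
def Spec_x_length_words (sentence : String) (x : Int) (out : Bool) : Prop := out = x_length_words_alt sentence x
instance (sentence : String) (x : Int) (out : Bool) : Decidable (Spec_x_length_words sentence x out) := by unfold Spec_x_length_words; infer_instance

-- ===== CLAIM (what is proved, stated in full; the proofs are below) =====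
def Claim_equal_x_length_words : Prop := ∀ (sentence : String) (x : Int), Dom_x_length_words sentence x → Spec_x_length_words sentence x (x_length_words sentence x)

-- ===== LEMMAS AND PROOFS =====

-- A's first loop builds exactly the mapped list of lengths
theorem pv_foldl_append_map (l : List String) (acc : List Int) :
    l.foldl (fun acc w => acc ++ [PySem.Str.len w]) acc = acc ++ l.map PySem.Str.len := by
  induction l generalizing acc with
  | nil => simp
  | cons h t ih => rw [List.foldl_cons, ih]; simp

-- A's second loop is a countP
theorem pv_foldl_count (x : Int) (L : List Int) (c : Int) :
    L.foldl (fun c i => if i ≥ x then c + 1 else c) c = c + (L.countP (fun i => decide (x ≤ i)) : Int) := by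
  induction L generalizing c with
  | nil => simp
  | cons h t ih =>
    by_cases hx : x ≤ h
    · simp [List.foldl_cons, hx, ih]; ring
    · simp [List.foldl_cons, hx, ih]

-- B's reduction: the fold keeps the minimum, so comparing it with x is a universal test
theorem pv_foldl_min_ge (x a : Int) (L : List Int) :
    (x ≤ L.foldl min a) ↔ (x ≤ a ∧ ∀ i ∈ L, x ≤ i) := by
  induction L generalizing a with
  | nil => simp
  | cons h t ih =>
    simp only [List.foldl_cons, ih, le_min_iff, List.mem_cons]
    constructor
    · rintro ⟨⟨ha, hh⟩, ht⟩
      exact ⟨ha, fun i hi => hi.elim (fun e => e ▸ hh) (ht i)⟩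
    · rintro ⟨ha, ht⟩
      exact ⟨⟨ha, ht h (Or.inl rfl)⟩, fun i hi => ht i (Or.inr hi)⟩

-- ===== VERDICT (by name: the statement is the Claim_ definition above) =====
theorem x_length_words_spec : Claim_equal_x_length_words := by
  intro sentence x _
  unfold Spec_x_length_words x_length_words x_length_words_alt
  cases hw : (PySem.Str.split? sentence " ").getD [] with
  | nil => simp
  | cons w ws =>
    simp only [pv_foldl_append_map, List.nil_append, pv_foldl_count, PySem.List.len]
    rw [Bool.eq_iff_iff]
    simp only [ge_iff_le, ← List.foldl_map, pv_foldl_min_ge, zero_add, decide_eq_true_eq, beq_iff_eq]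
    have key : (↑(List.countP (fun i => decide (x ≤ i)) (List.map PySem.Str.len (w :: ws))) : Int)
        = ↑(w :: ws).length ↔ ∀ i ∈ List.map PySem.Str.len (w :: ws), x ≤ i := by
      rw [Int.natCast_inj, ← List.length_map (as := (w :: ws)) (f := PySem.Str.len),
        List.countP_eq_length]
      simp
    have key2 : (∀ i ∈ List.map PySem.Str.len (w :: ws), x ≤ i)
        ↔ (x ≤ PySem.Str.len w ∧ ∀ i ∈ List.map PySem.Str.len ws, x ≤ i) := by
      simp
    split_ifs with hc
    · simpa using key2.mp (key.mp hc)
    · simp only [false_iff]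
      intro hconj
      exact hc (key.mpr (key2.mpr hconj))
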